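-- pv_equiv track=rewrite | github.com/Cyxuan0311/PNANA | python/scripts/data_preparation.py | _clean_diff
-- ===== SOURCE A (Python) =====
-- def _clean_diff(diff: str) -> str:
--     """Clean and truncate diff content."""
--     # Remove binary files from diff
--     lines = diff.split('\n')
--     cleaned_lines = []
--
--     skip_binary = False
--     for line in lines:
--         if line.startswith('diff --git'):
--             skip_binary = False
--         elif 'Binary files' in line or 'GIT binary patch' in line:
--             skip_binary = True
--             continue
--
--         if not skip_binary:
--             cleaned_lines.append(line)
--
--     diff = '\n'.join(cleaned_lines)
--
--     # Truncate very long diffs (keep first and last parts)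
--     if len(diff) > 10000:
--         lines = diff.split('\n')
--         if len(lines) > 100:
--             # Keep first 50 and last 50 lines
--             diff = '\n'.join(lines[:50] + ['... (diff truncated) ...'] + lines[-50:])
--
--     return diff.strip()
-- ===== SOURCE B (Python) =====
-- def _split_sections(lines):
--     """Group lines into sections: a preamble, then one section per 'diff --git' header."""
--     sections = [[]]
--     for line in lines:
--         if line.startswith('diff --git'):
--             sections.append([])
--         sections[-1].append(line)
--     return sections
--
--
-- def _keep_prefix(section):
--     """Keep a section's lines up to (excluding) its first binary-marker line."""
--     kept = []
--     for line in section: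
--         if ('Binary files' in line or 'GIT binary patch' in line) and not line.startswith('diff --git'):
--             break
--         kept.append(line)
--     return kept
--
--
-- def _clean_diff(diff: str) -> str:
--     """Clean and truncate diff content (section-based re-implementation)."""
--     sections = _split_sections(diff.split('\n'))
--     cleaned = '\n'.join(l for sec in sections for l in _keep_prefix(sec))
--     if len(cleaned) > 10000:
--         ls = cleaned.split('\n')
--         if len(ls) > 100:
--             cleaned = '\n'.join(ls[:50] + ['... (diff truncated) ...'] + ls[-50:])
--     return cleaned.strip()
-- ===== Notes on version B (the rewrite author's own statement) =====
-- stated objective: alternative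
-- what changed: B has no per-line boolean state: it first groups the lines into sections (a preamble plus one group per 'diff --git' header, a list-of-lists data structure A never builds), then independently keeps each section's prefix up to its first binary-marker line, and flattens; the truncation tail is unchanged.
import Mathlib
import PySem

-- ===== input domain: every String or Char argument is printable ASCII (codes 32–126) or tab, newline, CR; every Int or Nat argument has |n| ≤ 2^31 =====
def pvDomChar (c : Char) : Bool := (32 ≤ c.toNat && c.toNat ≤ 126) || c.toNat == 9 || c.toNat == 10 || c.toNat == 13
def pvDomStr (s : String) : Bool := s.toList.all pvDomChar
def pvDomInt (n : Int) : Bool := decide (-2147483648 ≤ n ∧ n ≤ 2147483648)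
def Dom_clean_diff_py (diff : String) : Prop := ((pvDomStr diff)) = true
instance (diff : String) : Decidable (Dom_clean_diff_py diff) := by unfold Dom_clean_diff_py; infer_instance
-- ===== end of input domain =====

-- B replaces A's stateful skip_binary scan by a staged pipeline: group lines into sections, keep each
-- section's prefix up to its first binary marker, flatten; same truncation tail. Objective: alternative.

-- shared helpers: both Pythons contain these very expressions
def pvSplitNL (s : String) : List String := (PySem.Str.split? s "\n").getD []

def pvIsHeader (l : String) : Bool := PySem.Str.startswith l "diff --git"

def pvIsBinary (l : String) : Bool :=
  PySem.Str.isIn "Binary files" l || PySem.Str.isIn "GIT binary patch" l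

-- the truncation + strip tail, textually identical in A and B
def pvTruncate (d : String) : String :=
  if 10000 < PySem.Str.len d then
    let lines := pvSplitNL d
    if 100 < (lines.length : Int) then
      PySem.Str.join "\n"
        (PySem.List.slice lines none (some 50) ++ ["... (diff truncated) ..."]
          ++ PySem.List.slice lines (some (-50)) none)
    else d
  else d

-- ===== PORT A =====
-- A's loop body: state = (cleaned_lines, skip_binary)
def pvStepA (st : List String × Bool) (line : String) : List String × Bool :=
  if pvIsHeader line then (st.1 ++ [line], false)          -- skip_binary = False, then appended
  else if pvIsBinary line then (st.1, true)                -- skip_binary = True; continue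
  else if st.2 then st else (st.1 ++ [line], st.2)

def clean_diff_py (diff : String) : String :=
  let lines := pvSplitNL diff
  let res := lines.foldl pvStepA ([], false)
  PySem.Str.strip (pvTruncate (PySem.Str.join "\n" res.1))

-- ===== PORT B =====
-- Source B's _split_sections loop body: on a header start a new group, always append to the last group
def pvGroupStep (gs : List (List String)) (l : String) : List (List String) :=
  if pvIsHeader l then (gs ++ [[]]).dropLast ++ [((gs ++ [[]]).getLast?.getD []) ++ [l]]
  else gs.dropLast ++ [(gs.getLast?.getD []) ++ [l]]

def pvSplitSections (lines : List String) : List (List String) :=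
  lines.foldl pvGroupStep [[]]

-- Source B's _keep_prefix break condition: a binary-marker line that is not a header
def pvCutPred (l : String) : Bool := pvIsBinary l && !pvIsHeader l

-- Source B's _keep_prefix loop: stop at the first such line of the section
def pvKeepPrefix : List String → List String
  | [] => []
  | l :: ls => if pvCutPred l then [] else l :: pvKeepPrefix ls

def clean_diff_py_alt (diff : String) : String :=
  let cleaned :=
    PySem.Str.join "\n" ((pvSplitSections (pvSplitNL diff)).flatMap pvKeepPrefix)
  PySem.Str.strip (pvTruncate cleaned)

-- ===== PRECONDITION & SPEC =====
def Spec_clean_diff_py (diff : String) (out : String) : Prop := out = clean_diff_py_alt diff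
instance (diff : String) (out : String) : Decidable (Spec_clean_diff_py diff out) := by unfold Spec_clean_diff_py; infer_instance

-- ===== CLAIM (what is proved, stated in full; the proofs are below) =====
def Claim_equal_clean_diff_py : Prop := ∀ (diff : String), Dom_clean_diff_py diff → Spec_clean_diff_py diff (clean_diff_py diff)

-- ===== LEMMAS AND PROOFS =====
-- recursive characterisation of the grouping fold: current open group g, remaining lines
def pvGroupsFrom (g : List String) : List String → List (List String)
  | [] => [g]
  | l :: ls => if pvIsHeader l then g :: pvGroupsFrom [l] ls else pvGroupsFrom (g ++ [l]) ls

theorem pvGroupStep_last (gs : List (List String)) (g : List String) (l : String) :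
    pvGroupStep (gs ++ [g]) l =
      if pvIsHeader l then (gs ++ [g]) ++ [[l]] else gs ++ [g ++ [l]] := by
  simp [pvGroupStep]

theorem pvFoldGroup_eq (lines : List String) :
    ∀ (gs : List (List String)) (g : List String),
      lines.foldl pvGroupStep (gs ++ [g]) = gs ++ pvGroupsFrom g lines := by
  induction lines with
  | nil => simp [pvGroupsFrom]
  | cons l ls ih =>
    intro gs g
    simp only [List.foldl_cons, pvGroupStep_last, pvGroupsFrom]
    by_cases h : pvIsHeader l
    · simpa [h, List.append_assoc] using ih (gs ++ [g]) [l]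
    · simp [h, ih gs (g ++ [l])]

theorem pvKeepPrefix_eq_takeWhile (sec : List String) :
    pvKeepPrefix sec = sec.takeWhile (fun l => !pvCutPred l) := by
  induction sec with
  | nil => rfl
  | cons l ls ih => cases h : pvCutPred l <;> simp [pvKeepPrefix, List.takeWhile_cons, h, ih]

theorem pvTW_append (p : String → Bool) (l : String) (g : List String) :
    (g ++ [l]).takeWhile p = if g.all p then g ++ [l].takeWhile p else g.takeWhile p := by
  induction g with
  | nil => simp
  | cons x xs ih =>
    cases h : p x
    · simp [List.takeWhile_cons, h]
    · simp only [List.cons_append, List.takeWhile_cons, h, List.all_cons, Bool.true_and, ih]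
      split_ifs <;> simp

theorem pvAllNot (g : List String) :
    (g.all fun x => !pvCutPred x) = !g.any pvCutPred := by
  induction g with
  | nil => rfl
  | cons x xs ih => cases h : pvCutPred x <;> simp [h, ih]

theorem pvTW_all (p : String → Bool) (g : List String) (h : g.all p = true) :
    g.takeWhile p = g := by
  induction g with
  | nil => rfl
  | cons x xs ih =>
    simp only [List.all_cons, Bool.and_eq_true] at h
    simp [List.takeWhile_cons, h.1, ih h.2]

-- A's fold computes exactly the flattened kept prefixes of the groups; the Bool state of A
-- corresponds to whether the open group g already contains a cut line.
theorem pvFoldA_eq (lines : List String) :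
    ∀ (g acc : List String),
      (lines.foldl pvStepA (acc ++ pvKeepPrefix g, g.any pvCutPred)).1 =
        acc ++ (pvGroupsFrom g lines).flatMap pvKeepPrefix := by
  induction lines with
  | nil => intro g acc; simp [pvGroupsFrom]
  | cons l ls ih =>
    intro g acc
    simp only [List.foldl_cons, pvStepA, pvGroupsFrom]
    rw [pvKeepPrefix_eq_takeWhile g]
    by_cases h1 : pvIsHeader l
    · have := ih [l] (acc ++ g.takeWhile (fun x => !pvCutPred x))
      simp [h1, pvKeepPrefix, pvCutPred] at this ⊢
      simpa [List.append_assoc, pvKeepPrefix_eq_takeWhile, pvCutPred] using this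
    · have := ih (g ++ [l]) acc
      rw [pvKeepPrefix_eq_takeWhile, pvTW_append] at this
      by_cases hg : g.any pvCutPred
      · have hgf : g.any pvCutPred = true := hg
        have hallv : (g.all fun x => !pvCutPred x) = false := by
          rw [pvAllNot, hgf]; rfl
        by_cases h2 : pvIsBinary l
        · have hany : (g ++ [l]).any pvCutPred = true := by
            simp [pvCutPred, h1, h2]
          rw [hany, hallv] at this
          simpa [h1, h2, hgf] using this
        · have hany : (g ++ [l]).any pvCutPred = true := by simp [hgf]
          rw [hany, hallv] at this
          simpa [h1, h2, hgf] using this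
      · have hgf : g.any pvCutPred = false := by simpa using hg
        have hallv : (g.all fun x => !pvCutPred x) = true := by
          rw [pvAllNot, hgf]; rfl
        have htw : g.takeWhile (fun x => !pvCutPred x) = g := pvTW_all _ _ hallv
        rw [hallv] at this
        by_cases h2 : pvIsBinary l
        · have hc : pvCutPred l = true := by simp [pvCutPred, h1, h2]
          have hany : (g ++ [l]).any pvCutPred = true := by simp [hc]
          rw [hany] at this
          simp [List.takeWhile_cons, hc] at this
          simpa [h1, h2, hgf, htw] using this
        · have hc : pvCutPred l = false := by simp [pvCutPred, h2]
          have hany : (g ++ [l]).any pvCutPred = false := by simp [hc, hgf]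
          rw [hany] at this
          simp [List.takeWhile_cons, hc] at this
          simpa [h1, h2, hgf, htw, List.append_assoc] using this

-- ===== VERDICT (by name: the statement is the Claim_ definition above) =====
theorem clean_diff_py_spec : Claim_equal_clean_diff_py := by
  intro diff _
  show clean_diff_py diff = clean_diff_py_alt diff
  simp only [clean_diff_py, clean_diff_py_alt, pvSplitSections]
  rw [show ([[]] : List (List String)) = [] ++ [[]] from rfl,
      pvFoldGroup_eq (pvSplitNL diff) [] []]
  have := pvFoldA_eq (pvSplitNL diff) [] []
  simp [pvKeepPrefix] at this
  rw [this]
  simp
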